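-- pv_equiv track=rewrite | github.com/cirosantilli/project-euler-solutions | solvers/988.py | frog_sum
-- ===== SOURCE A (Python) =====
-- from typing import Dict, Tuple
--
-- def frog_sum(a: int, b: int) -> int:
--     """
--     Compute F(a, b): the sum of frog positions over all non-attacking configurations.
--
--     A positive position x is allowed only when x is not representable as ua + vb with
--     u, v >= 0. For coprime a, b, every such gap can be written uniquely as
--
--         x = ab - ai - bj,
--
--     with i, j >= 1 and ai + bj < ab.
--
--     Two gaps correspond to attacking frogs exactly when their (i, j) pairs are
--     comparable coordinatewise. So non-attacking configurations are antichains in a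
--     Ferrers-shaped poset, and those antichains are encoded by monotone column heights.
--     """
--     if a <= 0 or b <= 0:
--         raise ValueError("a and b must be positive")
--
--     # The problem is symmetric in a and b, so keep the height small.
--     if a > b:
--         a, b = b, a
--
--     if a == 1:
--         return 0
--
--     width = b - 1
--
--     # h[i] = number of cells in column i of the Ferrers diagram.
--     # Columns are 1-indexed to match the math.
--     h = [0] * (width + 1)
--     for i in range(1, width + 1):
--         h[i] = (a * b - a * i - 1) // b
--
--     # dp[height] = (count_of_prefixes, total_weight_of_finished_maximal_elements)
--     # after processing columns up to the current one.
--     dp: Dict[int, Tuple[int, int]] = {t: (1, 0) for t in range(h[1] + 1)}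
--
--     for i in range(2, width + 1):
--         next_dp: Dict[int, Tuple[int, int]] = {}
--         for prev_height, (count, total) in dp.items():
--             limit = min(prev_height, h[i])
--             for cur_height in range(limit + 1):
--                 add = 0
--                 if prev_height > cur_height and prev_height > 0:
--                     add = a * b - a * (i - 1) - b * prev_height
--
--                 old_count, old_total = next_dp.get(cur_height, (0, 0))
--                 next_dp[cur_height] = (
--                     old_count + count,
--                     old_total + total + count * add,
--                 )
--         dp = next_dp
--
--     # Final sentinel column of height 0 closes the last maximal element, if any.
--     answer = 0
--     last_column = width
--     for prev_height, (count, total) in dp.items():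
--         add = 0
--         if prev_height > 0:
--             add = a * b - a * last_column - b * prev_height
--         answer += total + count * add
--
--     return answer
-- ===== SOURCE B (Python) =====
-- def frog_sum(a, b):
--     """F(a, b) via the same antichain DP, but each column is processed with a
--     single backward suffix-sum sweep over the previous heights instead of the
--     quadratic prev x cur double loop."""
--     if a <= 0 or b <= 0:
--         raise ValueError("a and b must be positive")
--     if a > b:
--         a, b = b, a
--     if a == 1:
--         return 0
--     width = b - 1
--     h1 = (a * b - a - 1) // b
--     cnt = [1] * (h1 + 1)
--     tot = [0] * (h1 + 1)
--     for i in range(2, width + 1):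
--         hi = (a * b - a * i - 1) // b
--         sc, st, sw = 0, 0, 0
--         new_cnt, new_tot = [], []
--         for p in range(len(cnt) - 1, -1, -1):
--             if p <= hi:
--                 new_cnt.append(sc + cnt[p])
--                 new_tot.append(st + tot[p] + sw)
--             sc += cnt[p]
--             st += tot[p]
--             if p > 0:
--                 sw += cnt[p] * (a * b - a * (i - 1) - b * p)
--         new_cnt.reverse()
--         new_tot.reverse()
--         cnt, tot = new_cnt, new_tot
--     ans = 0
--     for p in range(len(cnt)):
--         add = a * b - a * width - b * p if p > 0 else 0
--         ans += tot[p] + cnt[p] * add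
--     return ans
-- ===== Notes on version B (the rewrite author's own statement) =====
-- stated objective: faster
-- what changed: The dict-based DP with a quadratic per-column double loop over (prev_height, cur_height) pairs is replaced by height-indexed arrays updated by a single backward suffix-sum sweep per column, since each new entry is a suffix sum over the previous heights.
import Mathlib
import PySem

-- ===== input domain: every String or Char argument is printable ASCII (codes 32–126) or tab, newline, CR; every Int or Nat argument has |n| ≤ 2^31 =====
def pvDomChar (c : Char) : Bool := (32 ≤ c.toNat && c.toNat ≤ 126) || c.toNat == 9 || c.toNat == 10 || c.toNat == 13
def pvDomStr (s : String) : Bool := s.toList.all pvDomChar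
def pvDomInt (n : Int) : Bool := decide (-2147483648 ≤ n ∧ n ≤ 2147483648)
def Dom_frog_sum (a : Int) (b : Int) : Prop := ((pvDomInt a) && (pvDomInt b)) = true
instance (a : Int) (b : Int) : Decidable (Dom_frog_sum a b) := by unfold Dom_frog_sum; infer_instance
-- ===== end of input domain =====

-- B replaces A's dict DP with its quadratic per-column (prev_height, cur_height) double loop
-- by height-indexed arrays updated with one backward suffix-sum sweep per column (objective: faster).

-- ===== PORT A =====
-- inner loop body of A: the update of next_dp for one (prev=(count,total)) item and one cur_height
def aInnerFn (a b i prev count total : Int) (nd : PySem.Dict Int (Int × Int)) (cur : Int) :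
    PySem.Dict Int (Int × Int) :=
  let add : Int := if prev > cur ∧ prev > 0 then a * b - a * (i - 1) - b * prev else 0
  let old := nd.getD cur (0, 0)
  nd.insert cur (old.1 + count, old.2 + total + count * add)

-- one column transition of A's DP (the body of the 'for i in range(2, width + 1)' loop)
def aStep (a b i hi : Int) (dp : PySem.Dict Int (Int × Int)) : PySem.Dict Int (Int × Int) :=
  dp.items.foldl
    (fun next_dp pr =>
      let limit := min pr.1 hi
      (PySem.List.pyRange 0 (limit + 1) 1).foldl (aInnerFn a b i pr.1 pr.2.1 pr.2.2) next_dp)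
    PySem.Dict.empty

-- body of A after the ValueError guard and the (a, b) swap
def frogACore (a b : Int) : Int :=
  if a = 1 then 0
  else
    let width := b - 1
    let h := (PySem.List.pyRange 1 (width + 1) 1).foldl
      (fun h i => PySem.List.pySetD h i (PySem.Int.floordiv (a * b - a * i - 1) b))
      (PySem.List.pyRepeat [0] (width + 1))
    let dp0 : PySem.Dict Int (Int × Int) :=
      PySem.Dict.ofList ((PySem.List.pyRange 0 (PySem.List.pyGetD h 1 0 + 1) 1).map
        (fun t => (t, ((1 : Int), (0 : Int)))))
    let dp := (PySem.List.pyRange 2 (width + 1) 1).foldl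
      (fun dp i => aStep a b i (PySem.List.pyGetD h i 0) dp) dp0
    dp.items.foldl
      (fun answer pr =>
        let add : Int := if pr.1 > 0 then a * b - a * width - b * pr.1 else 0
        answer + pr.2.2 + pr.2.1 * add)
      0

def frog_sum (a : Int) (b : Int) : Int :=
  if a ≤ 0 ∨ b ≤ 0 then 0  -- Python raises ValueError here; excluded by Pre_frog_sum
  else
    let p := if a > b then (b, a) else (a, b)
    frogACore p.1 p.2

-- ===== PORT B =====
-- body of B's backward sweep: state is (sc, st, sw, new_cnt, new_tot)
def bStepFn (a b i hi : Int) (cnt tot : List Int)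
    (s : Int × Int × Int × List Int × List Int) (p : Int) :
    Int × Int × Int × List Int × List Int :=
  let nc := if p ≤ hi then s.2.2.2.1 ++ [s.1 + PySem.List.pyGetD cnt p 0] else s.2.2.2.1
  let nt := if p ≤ hi then s.2.2.2.2 ++ [s.2.1 + PySem.List.pyGetD tot p 0 + s.2.2.1] else s.2.2.2.2
  (s.1 + PySem.List.pyGetD cnt p 0,
   s.2.1 + PySem.List.pyGetD tot p 0,
   if p > 0 then s.2.2.1 + PySem.List.pyGetD cnt p 0 * (a * b - a * (i - 1) - b * p) else s.2.2.1,
   nc, nt)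

-- one column of B: a single backward suffix-sum sweep over the previous arrays
def bSweep (a b i hi : Int) (cnt tot : List Int) : List Int × List Int :=
  let st := (PySem.List.pyRange (PySem.List.len cnt - 1) (-1) (-1)).foldl
    (bStepFn a b i hi cnt tot) (0, 0, 0, ([] : List Int), ([] : List Int))
  (st.2.2.2.1.reverse, st.2.2.2.2.reverse)

-- body of B after the ValueError guard and the (a, b) swap
def frogBCore (a b : Int) : Int :=
  if a = 1 then 0
  else
    let width := b - 1
    let h1 := PySem.Int.floordiv (a * b - a - 1) b
    let ct := (PySem.List.pyRange 2 (width + 1) 1).foldl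
      (fun ct i => bSweep a b i (PySem.Int.floordiv (a * b - a * i - 1) b) ct.1 ct.2)
      (PySem.List.pyRepeat [(1 : Int)] (h1 + 1), PySem.List.pyRepeat [(0 : Int)] (h1 + 1))
    (PySem.List.pyRange 0 (PySem.List.len ct.1) 1).foldl
      (fun ans p =>
        let add : Int := if p > 0 then a * b - a * width - b * p else 0
        ans + PySem.List.pyGetD ct.2 p 0 + PySem.List.pyGetD ct.1 p 0 * add)
      0

def frog_sum_alt (a : Int) (b : Int) : Int :=
  if a ≤ 0 ∨ b ≤ 0 then 0  -- ValueError in Source B as well; excluded by Pre_frog_sum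
  else
    let p := if a > b then (b, a) else (a, b)
    frogBCore p.1 p.2

-- ===== PRECONDITION & SPEC =====
-- Pre_ excludes exactly the inputs (a ≤ 0 or b ≤ 0) on which the Python A raises ValueError.
def Pre_frog_sum (a : Int) (b : Int) : Prop := 0 < a ∧ 0 < b
instance (a : Int) (b : Int) : Decidable (Pre_frog_sum a b) := by unfold Pre_frog_sum; infer_instance
def pvWitness_frog_sum : Int × Int := (3, 5)

def Spec_frog_sum (a : Int) (b : Int) (out : Int) : Prop := out = frog_sum_alt a b
instance (a : Int) (b : Int) (out : Int) : Decidable (Spec_frog_sum a b out) := by unfold Spec_frog_sum; infer_instance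

-- ===== CLAIM (what is proved, stated in full; the proofs are below) =====
def Claim_equal_frog_sum : Prop := ∀ (a : Int) (b : Int), Dom_frog_sum a b → Pre_frog_sum a b → Spec_frog_sum a b (frog_sum a b)

-- ===== LEMMAS AND PROOFS =====

-- update applied by A's inner loop at one key (the body of aInnerFn, as a function)
def updFn (a b i prev count total : Int) (old : Int × Int) (k : Int) : Int × Int :=
  (old.1 + count,
   old.2 + total + count * (if prev > k ∧ prev > 0 then a * b - a * (i - 1) - b * prev else 0))

-- suffix sums of a height-indexed array, the common value both column steps compute
def sumC (c : List Int) (k n : Nat) : Int := ∑ p ∈ Finset.Ico k n, c.getD p 0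
def sumW (a b i : Int) (c : List Int) (k n : Nat) : Int :=
  ∑ p ∈ Finset.Ico k n, c.getD p 0 * (a * b - a * (i - 1) - b * (p : Int))

-- the value both column steps assign to height k, given previous arrays cnt/tot of length n
def colVal (a b i : Int) (cnt tot : List Int) (n k : Nat) : Int × Int :=
  (sumC cnt k n, sumC tot k n + sumW a b i cnt (k + 1) n)

-- the coupling invariant between A's dict and B's arrays
def Couple (d : PySem.Dict Int (Int × Int)) (ct : List Int × List Int) : Prop :=
  ct.2.length = ct.1.length ∧
  d.items = (List.range ct.1.length).map
    (fun (k : Nat) => ((k : Int), (ct.1.getD k 0, ct.2.getD k 0)))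

theorem dictRange_keys (d : PySem.Dict Int (Int × Int)) (n : Nat) (f : Nat → Int × Int)
    (hd : d.items = (List.range n).map (fun (k : Nat) => ((k : Int), f k))) :
    d.keys = (List.range n).map (fun (k : Nat) => (k : Int)) := by
  simp only [PySem.Dict.keys, hd, List.map_map]
  rfl

theorem dictRange_contains (d : PySem.Dict Int (Int × Int)) (n : Nat) (f : Nat → Int × Int)
    (hd : d.items = (List.range n).map (fun (k : Nat) => ((k : Int), f k))) (k : Nat) :
    d.contains (k : Int) = decide (k < n) := by
  rw [PySem.Dict.contains_eq_decide_mem_keys, dictRange_keys d n f hd]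
  simp

theorem dictRange_getD (d : PySem.Dict Int (Int × Int)) (n : Nat) (f : Nat → Int × Int)
    (hd : d.items = (List.range n).map (fun (k : Nat) => ((k : Int), f k))) (k : Nat) (z : Int × Int) :
    d.getD (k : Int) z = if k < n then f k else z := by
  have hnd : d.keys.Nodup := by
    rw [dictRange_keys d n f hd]
    exact (List.nodup_range).map (fun x y h => by exact_mod_cast h)
  split_ifs with h
  · exact PySem.Dict.getD_of_mem_items d (by rw [hd]; exact List.mem_map_of_mem (List.mem_range.mpr h)) hnd z
  · exact PySem.Dict.getD_of_not_contains d z (by rw [dictRange_contains d n f hd]; simpa using h)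

theorem insert_items_range (d : PySem.Dict Int (Int × Int)) (n : Nat) (f : Nat → Int × Int)
    (hd : d.items = (List.range n).map (fun (k : Nat) => ((k : Int), f k))) (j : Nat) (v : Int × Int)
    (hj : j ≤ n) :
    (d.insert (j : Int) v).items
      = (List.range (max n (j + 1))).map (fun (k : Nat) => ((k : Int), if k = j then v else f k)) := by
  rw [PySem.Dict.items_insert, dictRange_contains d n f hd, hd]
  by_cases h : j < n
  · have : max n (j + 1) = n := by omega
    rw [this]
    simp only [decide_eq_true_eq, if_pos h, List.map_map]
    refine List.map_congr_left (fun k hk => ?_)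
    simp only [Function.comp_apply]
    by_cases hkj : k = j
    · simp [hkj]
    · have : ¬ ((k : Int) == (j : Int)) = true := by simpa using (fun hh => hkj (by exact_mod_cast hh))
      simp [this, hkj]
  · have hjn : j = n := by omega
    have : max n (j + 1) = n + 1 := by omega
    rw [this, List.range_succ]
    simp only [decide_eq_true_eq, if_neg h, List.map_append]
    subst hjn
    refine congrArg₂ _ (List.map_congr_left (fun k hk => ?_)) (by simp)
    have hk' := List.mem_range.mp hk
    have hne : k ≠ j := by omega
    simp [hne]

theorem aInnerFn_eq (a b i prev count total : Int) (nd : PySem.Dict Int (Int × Int)) (cur : Int) :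
    aInnerFn a b i prev count total nd cur
      = nd.insert cur (updFn a b i prev count total (nd.getD cur (0, 0)) cur) := rfl

theorem inner_items (a b i prev count total : Int) (L : Nat) :
    ∀ (n : Nat), L ≤ n → ∀ (d : PySem.Dict Int (Int × Int)) (f : Nat → Int × Int),
    d.items = (List.range n).map (fun (k : Nat) => ((k : Int), f k)) →
    ((PySem.List.pyRange 0 ((L : Int) + 1) 1).foldl (aInnerFn a b i prev count total) d).items
      = (List.range (max n (L + 1))).map (fun (k : Nat) => ((k : Int),
          if k ≤ L then
            updFn a b i prev count total (if k < n then f k else (0, 0)) (k : Int)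
          else f k)) := by
  induction L with
  | zero =>
    intro n _ d f hd
    have h01 : PySem.List.pyRange 0 ((0 : Nat) + 1 : Int) 1 = [(0 : Int)] := by
      simpa using PySem.List.pyRange_one_singleton (a := 0)
    rw [h01]
    simp only [List.foldl_cons, List.foldl_nil, aInnerFn_eq]
    have hg := dictRange_getD d n f hd 0 (0, 0)
    simp only [Nat.cast_zero] at hg
    rw [hg]
    have hins := insert_items_range d n f hd 0
      (updFn a b i prev count total (if 0 < n then f 0 else (0, 0)) ((0 : Nat) : Int)) (by omega)
    simp only [Nat.cast_zero] at hins
    rw [hins]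
    refine List.map_congr_left (fun k hk => ?_)
    by_cases hk0 : k = 0
    · subst hk0; simp
    · simp [hk0]
  | succ L ih =>
    intro n hLn d f hd
    have hcast : ((L + 1 : Nat) : Int) + 1 = ((L : Int) + 1) + 1 := by push_cast; ring
    rw [hcast, PySem.List.pyRange_one_succ_right (by omega), List.foldl_append]
    have hR := ih n (by omega) d f hd
    simp only [List.foldl_cons, List.foldl_nil, aInnerFn_eq]
    have hLM : (L : Int) + 1 = ((L + 1 : Nat) : Int) := by push_cast; ring
    rw [hLM] at hR ⊢
    have hgd := dictRange_getD _ (max n (L + 1))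
      (fun k => if k ≤ L then updFn a b i prev count total (if k < n then f k else (0, 0)) (k : Int) else f k)
      hR (L + 1) (0, 0)
    rw [hgd]
    have hins := insert_items_range _ (max n (L + 1))
      (fun k => if k ≤ L then updFn a b i prev count total (if k < n then f k else (0, 0)) (k : Int) else f k)
      hR (L + 1)
      (updFn a b i prev count total
        (if L + 1 < max n (L + 1) then
          (if L + 1 ≤ L then updFn a b i prev count total (if L + 1 < n then f (L + 1) else (0, 0)) ((L + 1 : Nat) : Int) else f (L + 1))
         else (0, 0)) ((L + 1 : Nat) : Int))
      (by omega)
    rw [hins]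
    have hmax : max (max n (L + 1)) (L + 1 + 1) = max n (L + 1 + 1) := by omega
    rw [hmax]
    refine List.map_congr_left (fun k hk => ?_)
    by_cases hkL : k = L + 1
    · subst hkL
      have h1 : (L + 1 < max n (L + 1)) = (L + 1 < n) := by
        by_cases h : L + 1 < n
        · simp [h]
        · simp only [h, iff_false, eq_iff_iff]
          omega
      simp only [if_pos (le_refl (L + 1)), h1, if_neg (Nat.not_succ_le_self L)]
      simp
    · by_cases hk2 : k ≤ L
      · simp [hkL, hk2, (by omega : k ≤ L + 1)]
      · simp [hkL, hk2]
        exact fun h => absurd h (by omega)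

theorem sumC_succ (c : List Int) (k j : Nat) (h : k ≤ j) :
    sumC c k (j + 1) = sumC c k j + c.getD j 0 := Finset.sum_Ico_succ_top h _
theorem sumC_empty (c : List Int) (k j : Nat) (h : j ≤ k) : sumC c k j = 0 := by
  unfold sumC; rw [Finset.Ico_eq_empty (by omega)]; simp
theorem sumW_succ (a b i : Int) (c : List Int) (k j : Nat) (h : k ≤ j) :
    sumW a b i c k (j + 1) = sumW a b i c k j + c.getD j 0 * (a * b - a * (i - 1) - b * (j : Int)) :=
  Finset.sum_Ico_succ_top h _
theorem sumW_empty (a b i : Int) (c : List Int) (k j : Nat) (h : j ≤ k) : sumW a b i c k j = 0 := by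
  unfold sumW; rw [Finset.Ico_eq_empty (by omega)]; simp

theorem aStep_fold (a b i : Int) (Hi : Nat) (cnt tot : List Int) (j : Nat) :
    (((List.range j).map (fun (k : Nat) => ((k : Int), (cnt.getD k 0, tot.getD k 0)))).foldl
      (fun next_dp pr =>
        let limit := min pr.1 (Hi : Int)
        (PySem.List.pyRange 0 (limit + 1) 1).foldl (aInnerFn a b i pr.1 pr.2.1 pr.2.2) next_dp)
      PySem.Dict.empty).items
      = (List.range (min j (Hi + 1))).map
          (fun (k : Nat) => ((k : Int), colVal a b i cnt tot j k)) := by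
  induction j with
  | zero => simp [PySem.Dict.empty]
  | succ j ih =>
    rw [List.range_succ, List.map_append, List.foldl_append]
    simp only [List.map_cons, List.map_nil, List.foldl_cons, List.foldl_nil]
    have hmin : min ((j : Nat) : Int) (Hi : Int) = ((min j Hi : Nat) : Int) := by
      push_cast; rfl
    simp only [hmin]
    have hres := inner_items a b i (j : Int) (cnt.getD j 0) (tot.getD j 0) (min j Hi)
      (min j (Hi + 1)) (by omega) _ (fun k => colVal a b i cnt tot j k) ih
    rw [hres]
    have hmax : max (min j (Hi + 1)) (min j Hi + 1) = min (j + 1) (Hi + 1) := by omega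
    rw [hmax]
    refine List.map_congr_left (fun k hk => ?_)
    have hkr := List.mem_range.mp hk
    by_cases hkL : k ≤ min j Hi
    · have hold : (if k < min j (Hi + 1) then colVal a b i cnt tot j k else (0, 0))
          = colVal a b i cnt tot j k := by
        by_cases h : k < min j (Hi + 1)
        · simp [h]
        · have hkj : k = j := by omega
          simp only [hkj, colVal]
          rw [sumC_empty _ j j (le_refl j), sumC_empty _ j j (le_refl j),
              sumW_empty _ _ _ _ (j + 1) j (by omega)]
          simp
      simp only [if_pos hkL]
      rw [hold]
      have hkj : k ≤ j := by omega
      have hW : sumW a b i cnt (k + 1) (j + 1)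
          = sumW a b i cnt (k + 1) j + cnt.getD j 0 *
            (if (j : Int) > (k : Int) ∧ (j : Int) > 0 then a * b - a * (i - 1) - b * (j : Int) else 0) := by
        by_cases hlt : k < j
        · rw [sumW_succ a b i cnt (k + 1) j (by omega),
              if_pos ⟨by exact_mod_cast hlt, by exact_mod_cast (by omega : (0 : Nat) < j)⟩]
        · have hkj' : k = j := by omega
          subst hkj'
          rw [sumW_empty a b i cnt (k + 1) (k + 1) (le_refl _),
              sumW_empty a b i cnt (k + 1) k (by omega), if_neg (by simp)]
          ring
      simp only [updFn, colVal, sumC_succ cnt k j hkj, sumC_succ tot k j hkj, hW, Prod.mk.injEq]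
      exact ⟨trivial, trivial, by ring⟩
    · exact absurd hkr (by omega)
theorem aStep_items (a b i : Int) (Hi : Nat) (n : Nat) (cnt tot : List Int)
    (_hc : cnt.length = n) (_ht : tot.length = n) (d : PySem.Dict Int (Int × Int))
    (hd : d.items = (List.range n).map (fun (k : Nat) => ((k : Int), (cnt.getD k 0, tot.getD k 0)))) :
    (aStep a b i (Hi : Int) d).items
      = (List.range (min n (Hi + 1))).map (fun (k : Nat) => ((k : Int), colVal a b i cnt tot n k)) := by
  unfold aStep
  rw [hd]
  exact aStep_fold a b i Hi cnt tot n

theorem bSweep_fold (a b i : Int) (Hi : Nat) (cnt tot : List Int) (m : Nat) :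
    ∀ (s : Int × Int × Int × List Int × List Int),
    (PySem.List.pyRange ((m : Int) - 1) (-1) (-1)).foldl (bStepFn a b i (Hi : Int) cnt tot) s
      = (s.1 + sumC cnt 0 m,
         s.2.1 + sumC tot 0 m,
         s.2.2.1 + sumW a b i cnt 1 m,
         s.2.2.2.1 ++ ((List.range (min m (Hi + 1))).map (fun (k : Nat) => s.1 + sumC cnt k m)).reverse,
         s.2.2.2.2 ++ ((List.range (min m (Hi + 1))).map
           (fun (k : Nat) => s.2.1 + sumC tot k m + s.2.2.1 + sumW a b i cnt (k + 1) m)).reverse) := by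
  induction m with
  | zero =>
    intro s
    rw [PySem.List.pyRange_neg_one_eq_nil (by omega)]
    simp [sumC_empty, sumW_empty _ _ _ _ 1 0 (by omega)]
  | succ m ih =>
    intro s
    have h1 : ((m + 1 : Nat) : Int) - 1 = (m : Int) := by push_cast; ring
    rw [h1, PySem.List.pyRange_neg_one_cons (by omega)]
    rw [List.foldl_cons]
    rw [ih (bStepFn a b i (Hi : Int) cnt tot s (m : Int))]
    have hget : PySem.List.pyGetD cnt ((m : Nat) : Int) 0 = cnt.getD m 0 := by simp
    have hgett : PySem.List.pyGetD tot ((m : Nat) : Int) 0 = tot.getD m 0 := by simp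
    simp only [bStepFn, hget, hgett]
    by_cases hm : m ≤ Hi
    · have hmin1 : min (m + 1) (Hi + 1) = min m (Hi + 1) + 1 := by omega
      have hmin2 : min m (Hi + 1) = m := by omega
      have hle : ((m : Nat) : Int) ≤ (Hi : Int) := by exact_mod_cast hm
      simp only [if_pos hle, hmin1, hmin2, List.range_succ, List.map_append, List.reverse_append]
      refine congrArg₂ _ ?_ (congrArg₂ _ ?_ (congrArg₂ _ ?_ (congrArg₂ _ ?_ ?_)))
      · rw [sumC_succ cnt 0 m (by omega)]; ring
      · rw [sumC_succ tot 0 m (by omega)]; ring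
      · by_cases hm0 : m = 0
        · subst hm0
          simp [sumW_empty a b i cnt 1 1 (by omega), sumW_empty a b i cnt 1 0 (by omega)]
        · rw [if_pos (by exact_mod_cast (by omega : (0:Nat) < m)), sumW_succ a b i cnt 1 m (by omega)]
          ring
      · -- nc component
        simp only [List.map_cons, List.map_nil, List.reverse_cons, List.reverse_nil,
          List.nil_append, List.append_assoc]
        refine congrArg _ ?_
        refine congrArg₂ _ ?_ ?_
        · rw [sumC_succ cnt m m (le_refl m), sumC_empty cnt m m (le_refl m)]
          simp
        · refine congrArg _ (List.map_congr_left (fun k hk => ?_))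
          have hkm : k < m := by simpa [hmin2] using List.mem_range.mp hk
          rw [sumC_succ cnt k m (by omega)]
          ring
      · -- nt component
        simp only [List.map_cons, List.map_nil, List.reverse_cons, List.reverse_nil,
          List.nil_append, List.append_assoc]
        refine congrArg _ ?_
        refine congrArg₂ _ ?_ ?_
        · rw [sumC_succ tot m m (le_refl m), sumC_empty tot m m (le_refl m),
              sumW_empty a b i cnt (m + 1) (m + 1) (le_refl _)]
          simp
        · refine congrArg _ (List.map_congr_left (fun k hk => ?_))
          have hkm : k < m := by simpa [hmin2] using List.mem_range.mp hk
          rw [sumC_succ tot k m (by omega), sumW_succ a b i cnt (k + 1) m (by omega)]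
          by_cases hm0 : m = 0
          · omega
          · rw [if_pos (by exact_mod_cast (by omega : (0:Nat) < m))]
            ring
    · have hmin1 : min (m + 1) (Hi + 1) = Hi + 1 := by omega
      have hmin2 : min m (Hi + 1) = Hi + 1 := by omega
      have hle : ¬ ((m : Nat) : Int) ≤ (Hi : Int) := by exact_mod_cast hm
      simp only [if_neg hle, hmin1, hmin2]
      refine congrArg₂ _ ?_ (congrArg₂ _ ?_ (congrArg₂ _ ?_ (congrArg₂ _ ?_ ?_)))
      · rw [sumC_succ cnt 0 m (by omega)]; ring
      · rw [sumC_succ tot 0 m (by omega)]; ring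
      · rw [if_pos (by exact_mod_cast (by omega : (0:Nat) < m)), sumW_succ a b i cnt 1 m (by omega)]
        ring
      · refine congrArg _ (congrArg _ (List.map_congr_left (fun k hk => ?_)))
        have hkm : k < Hi + 1 := List.mem_range.mp hk
        rw [sumC_succ cnt k m (by omega)]
        ring
      · refine congrArg _ (congrArg _ (List.map_congr_left (fun k hk => ?_)))
        have hkm : k < Hi + 1 := List.mem_range.mp hk
        rw [sumC_succ tot k m (by omega), sumW_succ a b i cnt (k + 1) m (by omega)]
        rw [if_pos (by exact_mod_cast (by omega : (0:Nat) < m))]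
        ring

theorem bSweep_spec (a b i : Int) (Hi : Nat) (cnt tot : List Int) (n : Nat)
    (hc : cnt.length = n) (_ht : tot.length = n) :
    bSweep a b i (Hi : Int) cnt tot
      = ((List.range (min n (Hi + 1))).map (fun (k : Nat) => (colVal a b i cnt tot n k).1),
         (List.range (min n (Hi + 1))).map (fun (k : Nat) => (colVal a b i cnt tot n k).2)) := by
  unfold bSweep
  have hlen : PySem.List.len cnt - 1 = (n : Int) - 1 := by simp [hc]
  rw [hlen, bSweep_fold a b i Hi cnt tot n]
  simp only [List.nil_append, List.reverse_reverse]
  refine congrArg₂ Prod.mk ?_ ?_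
  · exact List.map_congr_left (fun k hk => by simp [colVal])
  · exact List.map_congr_left (fun k hk => by simp [colVal])

theorem foldl_rel {α σ τ : Type} (R : σ → τ → Prop) (FA : σ → α → σ) (FB : τ → α → τ)
    (l : List α) (h : ∀ x ∈ l, ∀ s t, R s t → R (FA s x) (FB t x)) :
    ∀ s t, R s t → R (l.foldl FA s) (l.foldl FB t) := by
  induction l with
  | nil => intro s t hst; simpa using hst
  | cons x xs ih =>
    intro s t hst
    simp only [List.foldl_cons]
    exact ih (fun y hy => h y (List.mem_cons_of_mem x hy)) _ _ (h x List.mem_cons_self s t hst)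

theorem foldl_pySetD_getD (F : Int → Int) (l : List Int) :
    ∀ (xs : List Int), (∀ x ∈ l, 0 ≤ x ∧ x < xs.length) →
    ∀ (j : Int), 0 ≤ j → j < xs.length →
    PySem.List.pyGetD (l.foldl (fun h i => PySem.List.pySetD h i (F i)) xs) j 0
      = if j ∈ l then F j else PySem.List.pyGetD xs j 0 := by
  induction l with
  | nil => intro xs _ j _ _; simp
  | cons x t ih =>
    intro xs hmem j hj0 hjlen
    simp only [List.foldl_cons]
    have hx := hmem x List.mem_cons_self
    have hlen : (PySem.List.pySetD xs x (F x)).length = xs.length := PySem.List.length_pySetD xs x (F x)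
    rw [ih (PySem.List.pySetD xs x (F x))
        (fun y hy => by rw [hlen]; exact hmem y (List.mem_cons_of_mem x hy)) j hj0 (by rw [hlen]; exact hjlen)]
    by_cases hjt : j ∈ t
    · simp [hjt]
    · simp only [if_neg hjt]
      have hset : PySem.List.pySetD xs x (F x) = xs.set x.toNat (F x) :=
        PySem.List.pySetD_of_nonneg xs (F x) hx.1
      have hb2 : j.toNat < xs.length := by omega
      have hb1 : j.toNat < (xs.set x.toNat (F x)).length := by
        rw [List.length_set]; exact hb2
      have hg1 : PySem.List.pyGetD (PySem.List.pySetD xs x (F x)) j 0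
          = (xs.set x.toNat (F x))[j.toNat]'hb1 := by
        rw [hset]
        exact PySem.List.pyGetD_eq_getElem _ 0 hj0 (by rw [List.length_set]; exact hjlen)
      have hg2 : PySem.List.pyGetD xs j 0 = xs[j.toNat]'hb2 :=
        PySem.List.pyGetD_eq_getElem xs 0 hj0 hjlen
      rw [hg1, hg2, List.getElem_set]
      by_cases hjx : j = x
      · subst hjx
        simp [List.mem_cons]
      · have : ¬ (x.toNat = j.toNat) := by omega
        simp [List.mem_cons, hjx, hjt, this]

theorem colStep_couple (a b i : Int) (Hi : Nat) (d : PySem.Dict Int (Int × Int))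
    (ct : List Int × List Int) (hcpl : Couple d ct) :
    Couple (aStep a b i (Hi : Int) d) (bSweep a b i (Hi : Int) ct.1 ct.2) := by
  obtain ⟨hlen, hitems⟩ := hcpl
  have hA := aStep_items a b i Hi ct.1.length ct.1 ct.2 rfl hlen d hitems
  have hB := bSweep_spec a b i Hi ct.1 ct.2 ct.1.length rfl hlen
  constructor
  · rw [hB]
    simp
  · rw [hB, hA]
    simp only [List.length_map, List.length_range]
    refine List.map_congr_left (fun k hk => ?_)
    have hk' := List.mem_range.mp hk
    rw [PySem.List.getD_map_range _ _ _ _ hk', PySem.List.getD_map_range _ _ _ _ hk']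

theorem init_couple (H1 : Int) :
    Couple (PySem.Dict.ofList ((PySem.List.pyRange 0 (H1 + 1) 1).map
              (fun t => (t, ((1 : Int), (0 : Int))))))
           (PySem.List.pyRepeat [(1 : Int)] (H1 + 1), PySem.List.pyRepeat [(0 : Int)] (H1 + 1)) := by
  have hofl : (PySem.Dict.ofList ((PySem.List.pyRange 0 (H1 + 1) 1).map
      (fun t => (t, ((1 : Int), (0 : Int)))))).items
      = (PySem.List.pyRange 0 (H1 + 1) 1).map (fun t => (t, ((1 : Int), (0 : Int)))) := by
    have h := PySem.Dict.items_foldl_insert_fresh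
      (l := (PySem.List.pyRange 0 (H1 + 1) 1).map (fun t => (t, ((1 : Int), (0 : Int)))))
      (k := Prod.fst) (v := Prod.snd) (d := PySem.Dict.empty)
      (fun p _ => PySem.Dict.contains_empty p.1)
      (by
        rw [List.map_map]
        have he : (Prod.fst ∘ fun (t : Int) => (t, ((1 : Int), (0 : Int))))
            = fun (t : Int) => t := rfl
        rw [he]
        simpa using PySem.List.nodup_pyRange_one (a := 0) (b := H1 + 1))
    simpa using h
  constructor
  · simp [PySem.List.pyRepeat_singleton]
  · rw [hofl]
    simp only [PySem.List.pyRepeat_singleton, List.length_replicate]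
    rw [PySem.List.pyRange_zero, List.map_map]
    refine List.map_congr_left (fun k hk => ?_)
    have hk' := List.mem_range.mp hk
    simp [List.getD, hk']

theorem final_eq (aa bb w : Int) (d : PySem.Dict Int (Int × Int)) (ct : List Int × List Int)
    (hcpl : Couple d ct) :
    d.items.foldl
      (fun answer pr =>
        let add : Int := if pr.1 > 0 then aa * bb - aa * w - bb * pr.1 else 0
        answer + pr.2.2 + pr.2.1 * add) 0
    = (PySem.List.pyRange 0 (PySem.List.len ct.1) 1).foldl
        (fun ans p =>
          let add : Int := if p > 0 then aa * bb - aa * w - bb * p else 0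
          ans + PySem.List.pyGetD ct.2 p 0 + PySem.List.pyGetD ct.1 p 0 * add) 0 := by
  obtain ⟨hlen, hitems⟩ := hcpl
  rw [hitems]
  have hl : PySem.List.len ct.1 = ((ct.1.length : Nat) : Int) := by simp
  rw [hl, PySem.List.pyRange_zero, Int.toNat_natCast]
  rw [List.foldl_map, List.foldl_map]
  refine PySem.List.foldl_congr_mem _ _ _ _ (fun acc k hk => ?_)
  simp

theorem core_eq (a b : Int) (ha : 0 < a) (hab : a ≤ b) : frogACore a b = frogBCore a b := by
  unfold frogACore frogBCore
  by_cases h1 : a = 1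
  · simp [h1]
  · rw [if_neg h1, if_neg h1]
    have hb : 0 < b := by omega
    have ha2 : 2 ≤ a := by omega
    dsimp only
    -- lookups into A's h list
    have hH : ∀ (i : Int), 1 ≤ i → i ≤ b - 1 →
        PySem.List.pyGetD ((PySem.List.pyRange 1 (b - 1 + 1) 1).foldl
          (fun h i => PySem.List.pySetD h i (PySem.Int.floordiv (a * b - a * i - 1) b))
          (PySem.List.pyRepeat [0] (b - 1 + 1))) i 0
        = PySem.Int.floordiv (a * b - a * i - 1) b := by
      intro i hi1 hi2
      have hlen : (PySem.List.pyRepeat [(0 : Int)] (b - 1 + 1)).length = (b - 1 + 1).toNat := by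
        rw [PySem.List.pyRepeat_singleton, List.length_replicate]
      rw [foldl_pySetD_getD _ _ _ (fun x hx => ?_) i (by omega) (by rw [hlen]; omega)]
      · rw [if_pos (PySem.List.mem_pyRange_one.mpr ⟨hi1, by omega⟩)]
      · have hx' := PySem.List.mem_pyRange_one.mp hx
        constructor
        · omega
        · rw [hlen]; omega
    have h1v := hH 1 (by omega) (by omega)
    rw [h1v]
    have hone : a * b - a * 1 - 1 = a * b - a - 1 := by ring
    rw [hone]
    -- couple the two column folds
    have hcol : ∀ x ∈ PySem.List.pyRange 2 (b - 1 + 1) 1,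
        ∀ (d : PySem.Dict Int (Int × Int)) (ct : List Int × List Int), Couple d ct →
        Couple ((fun dp (i : Int) => aStep a b i
            (PySem.List.pyGetD ((PySem.List.pyRange 1 (b - 1 + 1) 1).foldl
              (fun h i => PySem.List.pySetD h i (PySem.Int.floordiv (a * b - a * i - 1) b))
              (PySem.List.pyRepeat [0] (b - 1 + 1))) i 0) dp) d x)
          ((fun (ct : List Int × List Int) (i : Int) =>
            bSweep a b i (PySem.Int.floordiv (a * b - a * i - 1) b) ct.1 ct.2) ct x) := by
      intro i hi d ct hc
      obtain ⟨hi2, hiw⟩ := PySem.List.mem_pyRange_one.mp hi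
      dsimp only
      rw [hH i (by omega) (by omega)]
      have hnum : 0 ≤ a * b - a * i - 1 := by nlinarith
      have hfd : PySem.Int.floordiv (a * b - a * i - 1) b
          = (((PySem.Int.floordiv (a * b - a * i - 1) b).toNat : Nat) : Int) := by
        rw [Int.toNat_of_nonneg]
        rw [PySem.Int.floordiv_eq_ediv_of_pos hb]
        exact Int.ediv_nonneg hnum (le_of_lt hb)
      rw [hfd]
      exact colStep_couple a b i _ d ct hc
    have hmain := foldl_rel Couple _ _ (PySem.List.pyRange 2 (b - 1 + 1) 1) hcol _ _
      (init_couple (PySem.Int.floordiv (a * b - a - 1) b))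
    exact final_eq a b (b - 1) _ _ hmain

-- ===== VERDICT (by name: the statement is the Claim_ definition above) =====
theorem frog_sum_spec : Claim_equal_frog_sum := by
  intro a b _ hpre
  unfold Spec_frog_sum frog_sum frog_sum_alt
  obtain ⟨ha, hb⟩ := hpre
  have : ¬ (a ≤ 0 ∨ b ≤ 0) := by omega
  simp only [this, ite_false]
  split_ifs with h
  · exact core_eq b a hb (by omega)
  · exact core_eq a b ha (by omega)
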